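-- pv_equiv track=rewrite | github.com/avickars/mosscanvasgui | moss/courses/CMPT310_D100_Artificial_Intelligence_Survey/Assignment_1/submissions/Yao_Tong/a1.py | tup2list
-- ===== SOURCE A (Python) =====
-- def tup2list(state):
--     tup = [None] * 12
--     j = 0
--     for i in range(12):
--         if i not in [2, 3, 8]:
--             tup[i] = state[j]
--             j += 1
--         else:
--             pass
--     return tuple(tup)
-- ===== SOURCE B (Python) =====
-- def tup2list(state):
--     lst = [state[i] for i in range(9)]
--     for idx in (2, 3, 8):
--         lst.insert(idx, None)
--     return tuple(lst)
-- ===== Notes on version B (the rewrite author's own statement) =====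
-- stated objective: alternative
-- what changed: Replaces A's 12-slot pass with a membership test and manual write cursor by a gather of the 9 payload elements followed by three list.insert calls at the gap positions.
import Mathlib
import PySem

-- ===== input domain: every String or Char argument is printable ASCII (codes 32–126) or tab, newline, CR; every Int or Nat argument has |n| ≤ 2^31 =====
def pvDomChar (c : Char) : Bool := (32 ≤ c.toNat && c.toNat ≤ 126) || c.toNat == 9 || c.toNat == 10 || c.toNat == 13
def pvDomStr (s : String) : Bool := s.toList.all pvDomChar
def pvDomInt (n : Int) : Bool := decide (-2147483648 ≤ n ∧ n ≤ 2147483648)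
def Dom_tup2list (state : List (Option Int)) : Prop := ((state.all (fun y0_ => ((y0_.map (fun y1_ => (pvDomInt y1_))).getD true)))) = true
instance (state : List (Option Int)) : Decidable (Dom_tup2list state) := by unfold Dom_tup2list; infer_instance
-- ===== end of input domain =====

-- B replaces A's 12-slot membership-tested pass with gather-the-payload then three inserts; alternative decomposition, same cost.

-- ===== PORT A =====
-- tup = [None]*12; j = 0; for i in range(12): if i not in [2,3,8]: tup[i] = state[j]; j += 1; return tuple(tup)
-- pyGetD's default is only reached when j is out of range (Python IndexError there), excluded by Pre_tup2list.
def tup2list (state : List (Option Int)) : List (Option Int) :=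
  (((PySem.List.pyRange 0 12 1).foldl
      (fun (acc : List (Option Int) × Int) i =>
        if i ∉ ([2, 3, 8] : List Int) then
          (PySem.List.pySetD acc.1 i (PySem.List.pyGetD state acc.2 none), acc.2 + 1)
        else acc)
      (List.replicate 12 (none : Option Int), 0))).1

-- ===== PORT B =====
-- lst = [state[i] for i in range(9)]; for idx in (2,3,8): lst.insert(idx, None); return tuple(lst)
-- pyGetD's default is only reached on short state (Python IndexError), excluded by Pre_tup2list.
def tup2list_alt (state : List (Option Int)) : List (Option Int) :=
  let lst := (PySem.List.pyRange 0 9 1).map (fun i => PySem.List.pyGetD state i none)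
  let lst := PySem.List.insert lst 2 (none : Option Int)
  let lst := PySem.List.insert lst 3 (none : Option Int)
  PySem.List.insert lst 8 (none : Option Int)

-- ===== PRECONDITION & SPEC =====
-- Both programs index state[0]..state[8]: Python raises IndexError on fewer than 9 elements.
def Pre_tup2list (state : List (Option Int)) : Prop := 9 ≤ state.length
instance (state : List (Option Int)) : Decidable (Pre_tup2list state) := by unfold Pre_tup2list; infer_instance
def pvWitness_tup2list : List (Option Int) := [some 1, some 2, some 3, none, some 5, some 6, some 7, some 8, some 9]

def Spec_tup2list (state : List (Option Int)) (out : List (Option Int)) : Prop := out = tup2list_alt state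
instance (state : List (Option Int)) (out : List (Option Int)) : Decidable (Spec_tup2list state out) := by unfold Spec_tup2list; infer_instance

-- ===== CLAIM (what is proved, stated in full; the proofs are below) =====
def Claim_equal_tup2list : Prop := ∀ (state : List (Option Int)), Dom_tup2list state → Pre_tup2list state → Spec_tup2list state (tup2list state)

-- ===== LEMMAS AND PROOFS =====
theorem tup2list_eq_explicit (s0 s1 s2 s3 s4 s5 s6 s7 s8 : Option Int) (rest : List (Option Int)) :
    tup2list (s0::s1::s2::s3::s4::s5::s6::s7::s8::rest)
      = [s0, s1, none, none, s2, s3, s4, s5, none, s6, s7, s8] := by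
  simp [tup2list, PySem.List.pyRange, List.range_succ, PySem.List.pyGetD_ofNat',
        PySem.List.pySetD_of_nonneg, List.set]

theorem tup2list_alt_eq_explicit (s0 s1 s2 s3 s4 s5 s6 s7 s8 : Option Int) (rest : List (Option Int)) :
    tup2list_alt (s0::s1::s2::s3::s4::s5::s6::s7::s8::rest)
      = [s0, s1, none, none, s2, s3, s4, s5, none, s6, s7, s8] := by
  simp [tup2list_alt, PySem.List.pyRange, List.range_succ, PySem.List.pyGetD_ofNat',
        PySem.List.insert_ofNat]

-- ===== VERDICT (by name: the statement is the Claim_ definition above) =====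
theorem tup2list_spec : Claim_equal_tup2list := by
  intro state _ hpre
  unfold Spec_tup2list
  match state, hpre with
  | s0::s1::s2::s3::s4::s5::s6::s7::s8::rest, _ =>
    rw [tup2list_eq_explicit, tup2list_alt_eq_explicit]
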